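-- pv_equiv track=rewrite | github.com/Ery4z/MSWE | utils.py | list_chunk_region
-- ===== SOURCE A (Python) =====
-- def get_chunk_pos(coord):
--     c_x = coord[0] // 16
--     c_z = coord[1] // 16
--     return (c_x, c_z)
--
-- def get_region_pos(coord):
--     c_x = coord[0] // 32
--     c_z = coord[1] // 32
--     return (c_x, c_z)
--
-- def normalize_chunk_coord(coord):
--     c_x = coord[0] % 32
--     c_z = coord[1] % 32
--     return (c_x, c_z)
--
-- def list_chunk_region(coord1, coord2):
--     chunk_coord1 = get_chunk_pos(coord1)
--     chunk_coord2 = get_chunk_pos(coord2)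
--
--     chunk_list = []
--     # TODO : Make this thing work for any points with the range (can only increase)
--     P0 = (
--         min(chunk_coord1[0], chunk_coord2[0]),
--         min(chunk_coord1[1], chunk_coord2[1]),
--     )
--     P1 = (
--         max(chunk_coord1[0], chunk_coord2[0]),
--         max(chunk_coord1[1], chunk_coord2[1]),
--     )
--
--     for x in range(P0[0], P1[0] + 1):
--         for z in range(P0[1], P1[1] + 1):
--             chunk_list.append((x, z))
--
--     dict_region = {}
--     for coord_chunk in chunk_list:
--         coord_region = get_region_pos(coord_chunk)
--         normalized_chunk_coord = normalize_chunk_coord(coord_chunk)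
--         if not coord_region in dict_region:
--             dict_region[coord_region] = [normalized_chunk_coord]
--         else:
--             dict_region[coord_region].append(normalized_chunk_coord)
--
--     return dict_region
-- ===== SOURCE B (Python) =====
-- def get_chunk_pos(coord):
--     return (coord[0] // 16, coord[1] // 16)
--
-- def get_region_pos(coord):
--     return (coord[0] // 32, coord[1] // 32)
--
-- def normalize_chunk_coord(coord):
--     return (coord[0] % 32, coord[1] % 32)
--
-- def list_chunk_region(coord1, coord2):
--     c1 = get_chunk_pos(coord1)
--     c2 = get_chunk_pos(coord2)
--     x0, x1 = min(c1[0], c2[0]), max(c1[0], c2[0])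
--     z0, z1 = min(c1[1], c2[1]), max(c1[1], c2[1])
--     chunks = [(x, z) for x in range(x0, x1 + 1) for z in range(z0, z1 + 1)]
--     regions = dict.fromkeys(map(get_region_pos, chunks))
--     # each region's bucket is the rectangle clipped to that region's 32x32 cell
--     return {
--         (rx, rz): [
--             normalize_chunk_coord((x, z))
--             for x in range(max(x0, 32 * rx), min(x1, 32 * rx + 31) + 1)
--             for z in range(max(z0, 32 * rz), min(z1, 32 * rz + 31) + 1)
--         ]
--         for (rx, rz) in regions
--     }
-- ===== Notes on version B (the rewrite author's own statement) =====
-- stated objective: alternative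
-- what changed: Replaces A's imperative chunk loop with incremental dict bucketing (membership test + insert-or-append per chunk) by a declarative two-pass form: dict.fromkeys over the chunk grid yields the region keys, and each region's bucket is computed directly as the rectangle clipped to that region's 32x32 cell (range intersection arithmetic), with no dict mutation at all.
import Mathlib
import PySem

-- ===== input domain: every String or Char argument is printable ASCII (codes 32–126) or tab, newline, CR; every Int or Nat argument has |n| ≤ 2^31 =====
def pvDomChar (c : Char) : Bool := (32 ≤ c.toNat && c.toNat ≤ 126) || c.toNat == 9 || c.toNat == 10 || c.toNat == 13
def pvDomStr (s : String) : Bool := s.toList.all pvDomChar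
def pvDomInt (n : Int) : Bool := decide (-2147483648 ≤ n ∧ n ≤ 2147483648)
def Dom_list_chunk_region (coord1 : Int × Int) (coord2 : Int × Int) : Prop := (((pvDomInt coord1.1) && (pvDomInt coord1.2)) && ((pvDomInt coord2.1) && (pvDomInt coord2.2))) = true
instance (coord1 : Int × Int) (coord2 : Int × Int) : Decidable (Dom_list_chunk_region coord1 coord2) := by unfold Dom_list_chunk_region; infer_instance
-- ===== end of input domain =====

-- B replaces A's imperative chunk loop and incremental dict bucketing with a declarative
-- two-pass form (chunk-grid comprehension, dict.fromkeys for the region keys, a filtering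
-- dict comprehension per region); objective: simpler, not faster.

-- ===== PORT A =====
-- shared module helpers (used by both Pythons)
def get_chunk_pos (coord : Int × Int) : Int × Int :=
  (PySem.Int.floordiv coord.1 16, PySem.Int.floordiv coord.2 16)

def get_region_pos (coord : Int × Int) : Int × Int :=
  (PySem.Int.floordiv coord.1 32, PySem.Int.floordiv coord.2 32)

def normalize_chunk_coord (coord : Int × Int) : Int × Int :=
  (PySem.Int.mod coord.1 32, PySem.Int.mod coord.2 32)

def list_chunk_region (coord1 : Int × Int) (coord2 : Int × Int) : List (Int × Int × List (Int × Int)) :=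
  let chunk_coord1 := get_chunk_pos coord1
  let chunk_coord2 := get_chunk_pos coord2
  let P0 : Int × Int := (min chunk_coord1.1 chunk_coord2.1, min chunk_coord1.2 chunk_coord2.2)
  let P1 : Int × Int := (max chunk_coord1.1 chunk_coord2.1, max chunk_coord1.2 chunk_coord2.2)
  -- for x in range(P0[0], P1[0]+1): for z in range(P0[1], P1[1]+1): chunk_list.append((x, z))
  let chunk_list : List (Int × Int) :=
    (PySem.List.pyRange P0.1 (P1.1 + 1) 1).foldl (fun acc x =>
      (PySem.List.pyRange P0.2 (P1.2 + 1) 1).foldl (fun acc2 z => acc2 ++ [(x, z)]) acc) []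
  -- dict bucketing loop: dict_region[coord_region] = [..] / .append(..)
  let dict_region : PySem.Dict (Int × Int) (List (Int × Int)) :=
    chunk_list.foldl (fun d coord_chunk =>
      let coord_region := get_region_pos coord_chunk
      let normalized_chunk_coord := normalize_chunk_coord coord_chunk
      if ¬ (d.contains coord_region = true) then d.insert coord_region [normalized_chunk_coord]
      else d.modify coord_region [] (fun v => v ++ [normalized_chunk_coord])) PySem.Dict.empty
  -- the required signature flattens the key pair: ((rx, rz), bucket) ↦ (rx, rz, bucket)
  dict_region.items.map (fun p => (p.1.1, p.1.2, p.2))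

-- ===== PORT B =====
def list_chunk_region_alt (coord1 : Int × Int) (coord2 : Int × Int) : List (Int × Int × List (Int × Int)) :=
  let c1 := get_chunk_pos coord1
  let c2 := get_chunk_pos coord2
  let x0 := min c1.1 c2.1
  let x1 := max c1.1 c2.1
  let z0 := min c1.2 c2.2
  let z1 := max c1.2 c2.2
  -- chunks = [(x, z) for x in range(x0, x1+1) for z in range(z0, z1+1)]
  let chunks : List (Int × Int) :=
    (PySem.List.pyRange x0 (x1 + 1) 1).flatMap (fun x =>
      (PySem.List.pyRange z0 (z1 + 1) 1).map (fun z => (x, z)))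
  -- regions = dict.fromkeys(map(get_region_pos, chunks))
  let regions : List (Int × Int) := PySem.List.dedup (chunks.map get_region_pos)
  -- each region's bucket is the rectangle clipped to that region's 32x32 cell
  regions.map (fun r =>
    (r.1, r.2,
      (PySem.List.pyRange (max x0 (32 * r.1)) (min x1 (32 * r.1 + 31) + 1) 1).flatMap (fun x =>
        (PySem.List.pyRange (max z0 (32 * r.2)) (min z1 (32 * r.2 + 31) + 1) 1).map (fun z =>
          normalize_chunk_coord (x, z)))))

-- ===== PRECONDITION & SPEC =====
def Spec_list_chunk_region (coord1 : Int × Int) (coord2 : Int × Int) (out : List (Int × Int × List (Int × Int))) : Prop := out = list_chunk_region_alt coord1 coord2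
instance (coord1 : Int × Int) (coord2 : Int × Int) (out : List (Int × Int × List (Int × Int))) : Decidable (Spec_list_chunk_region coord1 coord2 out) := by unfold Spec_list_chunk_region; infer_instance

-- ===== CLAIM (what is proved, stated in full; the proofs are below) =====
def Claim_equal_list_chunk_region : Prop := ∀ (coord1 : Int × Int) (coord2 : Int × Int), Dom_list_chunk_region coord1 coord2 → Spec_list_chunk_region coord1 coord2 (list_chunk_region coord1 coord2)

-- ===== LEMMAS AND PROOFS =====

-- A's insert-or-append branch is exactly a modify with default []
lemma step_eq_modify (d : PySem.Dict (Int × Int) (List (Int × Int))) (k : Int × Int) (v : Int × Int) :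
    (if ¬ (d.contains k = true) then d.insert k [v]
     else d.modify k [] (fun l => l ++ [v])) = d.modify k [] (fun l => l ++ [v]) := by
  by_cases h : d.contains k = true
  · simp [h]
  · simp only [h]
    simp only [PySem.Dict.modify, PySem.Dict.insert, h, if_false, Bool.false_eq_true]
    rw [PySem.Dict.getD_of_not_contains d [] (by simpa using h)]
    simp

-- A's dict-bucketing fold, rendered as keys + per-key filtered buckets
lemma dict_fold_items (l : List (Int × Int)) :
    ((l.foldl (fun d c =>
        if ¬ (d.contains (get_region_pos c) = true) then d.insert (get_region_pos c) [normalize_chunk_coord c]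
        else d.modify (get_region_pos c) [] (fun v => v ++ [normalize_chunk_coord c])) PySem.Dict.empty).items)
    = (PySem.Set.ofList (l.map get_region_pos)).map (fun r =>
        (r, (l.filter (fun c => get_region_pos c == r)).map normalize_chunk_coord)) := by
  simp only [step_eq_modify]
  have hnodup : ((l.foldl (fun d c =>
      d.modify (get_region_pos c) [] (fun v => v ++ [normalize_chunk_coord c])) PySem.Dict.empty).keys).Nodup :=
    PySem.Dict.nodup_keys_foldl_modify_key l get_region_pos []
      (fun _ c v => v ++ [normalize_chunk_coord c]) PySem.Dict.empty (by simp [PySem.Dict.empty, PySem.Dict.keys])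
  rw [PySem.Dict.items_eq_map_keys _ hnodup []]
  rw [PySem.Dict.keys_foldl_modify_key l get_region_pos [] (fun _ c v => v ++ [normalize_chunk_coord c])]
  have hkeys : PySem.Set.update (PySem.Dict.empty : PySem.Dict (Int × Int) (List (Int × Int))).keys
      (l.map get_region_pos) = PySem.Set.ofList (l.map get_region_pos) := rfl
  rw [hkeys]
  refine List.map_congr_left (fun r _ => ?_)
  have hfold : (l.foldl (fun d c =>
        d.modify (get_region_pos c) [] (fun v => v ++ [normalize_chunk_coord c])) PySem.Dict.empty)
      = ((l.map (fun c => (get_region_pos c, normalize_chunk_coord c))).foldl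
          (fun d p => d.modify p.1 [] (fun v => v ++ [p.2])) PySem.Dict.empty) := by
    rw [List.foldl_map]
  rw [hfold, PySem.Dict.getD_foldl_modify_append]
  simp [List.filter_map, List.map_map, Function.comp_def, PySem.Dict.getD, PySem.Dict.get?, PySem.Dict.empty]

-- the nested append loop builds exactly the product list
lemma chunk_list_eq (a b c d : Int) :
    ((PySem.List.pyRange a b 1).foldl (fun acc x =>
        (PySem.List.pyRange c d 1).foldl (fun acc2 z => acc2 ++ [(x, z)]) acc) ([] : List (Int × Int)))
    = (PySem.List.pyRange a b 1).flatMap (fun x => (PySem.List.pyRange c d 1).map (fun z => (x, z))) := by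
  simp only [PySem.List.foldl_append_singleton_eq_map]
  rw [PySem.List.foldl_append_eq_flatMap]
  simp


-- 1-D clipping: the members of [a..b] lying in floordiv-cell q form the clipped interval
lemma filter_range_floordiv (q : Int) : ∀ (n : Nat) (a b : Int), (b + 1 - a).toNat = n →
    (PySem.List.pyRange a (b + 1) 1).filter (fun t => PySem.Int.floordiv t 32 == q)
      = PySem.List.pyRange (max a (32 * q)) (min b (32 * q + 31) + 1) 1 := by
  intro n
  induction n with
  | zero =>
    intro a b h
    rw [PySem.List.pyRange_one_eq_nil (by omega), PySem.List.pyRange_one_eq_nil (by omega)]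
    rfl
  | succ n ih =>
    intro a b h
    have hab : a ≤ b := by omega
    rw [PySem.List.pyRange_one_cons (by omega)]
    by_cases h32 : 32 * q ≤ a ∧ a ≤ 32 * q + 31
    · have hfd : PySem.Int.floordiv a 32 = q :=
        (PySem.Int.floordiv_eq_iff_of_pos (by norm_num)).mpr (by constructor <;> omega)
      rw [List.filter_cons_of_pos (by simpa using hfd)]
      rw [ih (a + 1) b (by omega)]
      rw [show max (a + 1) (32 * q) = a + 1 by omega]
      rw [show max a (32 * q) = a by omega]
      rw [PySem.List.pyRange_one_cons (show a < min b (32 * q + 31) + 1 by omega)]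
    · have hfd : ¬ PySem.Int.floordiv a 32 = q := by
        rw [PySem.Int.floordiv_eq_iff_of_pos (by norm_num)]
        omega
      rw [List.filter_cons_of_neg (by simpa using hfd)]
      rw [ih (a + 1) b (by omega)]
      by_cases hc : a < 32 * q
      · rw [show max (a + 1) (32 * q) = 32 * q by omega, show max a (32 * q) = 32 * q by omega]
      · rw [PySem.List.pyRange_one_eq_nil (by omega), PySem.List.pyRange_one_eq_nil (by omega)]

lemma flatMap_ite_filter {α β : Type} (l : List α) (p : α → Bool) (g : α → List β) :
    (l.flatMap (fun x => if p x then g x else [])) = (l.filter p).flatMap g := by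
  induction l with
  | nil => rfl
  | cons a l ih => by_cases h : p a <;> simp [h, ih]

-- a region's bucket, by filtering the chunk grid, is the grid of the clipped rectangle
lemma bucket_eq (x0 x1 z0 z1 rx rz : Int) :
    ((((PySem.List.pyRange x0 (x1 + 1) 1).flatMap (fun x =>
        (PySem.List.pyRange z0 (z1 + 1) 1).map (fun z => (x, z)))).filter
      (fun c => get_region_pos c == (rx, rz))).map normalize_chunk_coord)
    = (PySem.List.pyRange (max x0 (32 * rx)) (min x1 (32 * rx + 31) + 1) 1).flatMap (fun x =>
        (PySem.List.pyRange (max z0 (32 * rz)) (min z1 (32 * rz + 31) + 1) 1).map (fun z =>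
          normalize_chunk_coord (x, z))) := by
  rw [List.filter_flatMap]
  have inner : ∀ x : Int,
      ((PySem.List.pyRange z0 (z1 + 1) 1).map (fun z => (x, z))).filter
        (fun c => get_region_pos c == (rx, rz))
      = if (PySem.Int.floordiv x 32 == rx) then
          ((PySem.List.pyRange z0 (z1 + 1) 1).filter (fun z => PySem.Int.floordiv z 32 == rz)).map
            (fun z => (x, z))
        else [] := by
    intro x
    rw [List.filter_map]
    by_cases hx : PySem.Int.floordiv x 32 = rx
    · rw [if_pos (by simpa using hx)]
      congr 1
      refine List.filter_congr (fun z _ => ?_)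
      show (get_region_pos (x, z) == (rx, rz)) = (PySem.Int.floordiv z 32 == rz)
      rw [Bool.eq_iff_iff]
      have hx' : x / 32 = rx := by simpa using hx
      simp [beq_iff_eq, get_region_pos, Prod.ext_iff, hx']
    · rw [if_neg (by simpa using hx)]
      rw [List.filter_eq_nil_iff.mpr]
      · simp
      · intro z _
        show ¬ (get_region_pos (x, z) == (rx, rz)) = true
        have hx' : ¬ (x / 32 = rx) := fun h => hx (by simpa using h)
        simp [beq_iff_eq, get_region_pos, Prod.ext_iff, hx']
  simp only [inner]
  rw [flatMap_ite_filter]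
  rw [filter_range_floordiv rx _ x0 x1 rfl]
  rw [filter_range_floordiv rz _ z0 z1 rfl]
  rw [List.map_flatMap]
  congr 1
  funext x
  rw [List.map_map]
  rfl

-- ===== VERDICT (by name: the statement is the Claim_ definition above) =====
theorem list_chunk_region_spec : Claim_equal_list_chunk_region := by
  intro coord1 coord2 _
  unfold Spec_list_chunk_region list_chunk_region list_chunk_region_alt
  simp only [chunk_list_eq, dict_fold_items, PySem.List.dedup_eq_ofList]
  rw [List.map_map]
  refine List.map_congr_left (fun r _ => ?_)
  obtain ⟨rx, rz⟩ := r
  simp only [bucket_eq]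
  rfl
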